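-- pv_equiv track=rewrite | github.com/9BwgeBTPG-QH/Dot-connect | extract.py | apply_alias
-- ===== SOURCE A (Python) =====
-- def apply_alias(email: str, alias_map: dict) -> str:
--     """エイリアスを正規アドレスに変換."""
--     if not alias_map:
--         return email
--     for canonical, aliases in alias_map.items():
--         if email == canonical.lower():
--             return canonical.lower()
--         if isinstance(aliases, list) and email in [a.lower() for a in aliases]:
--             return canonical.lower()
--     return email
-- ===== SOURCE B (Python) =====
-- def apply_alias(email: str, alias_map: dict) -> str:
--     """エイリアスを正規アドレスに変換."""
--     index = {}
--     for canonical, aliases in alias_map.items():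
--         c = canonical.lower()
--         index.setdefault(c, c)
--         if isinstance(aliases, list):
--             for a in aliases:
--                 index.setdefault(a.lower(), c)
--     return index.get(email, email)
-- ===== Notes on version B (the rewrite author's own statement) =====
-- stated objective: idiomatic
-- what changed: B replaces A's early-exit scan over items with a single pass that builds a first-write-wins lookup table (dict.setdefault, canonical inserted before its aliases) followed by one dict.get.
import Mathlib
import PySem

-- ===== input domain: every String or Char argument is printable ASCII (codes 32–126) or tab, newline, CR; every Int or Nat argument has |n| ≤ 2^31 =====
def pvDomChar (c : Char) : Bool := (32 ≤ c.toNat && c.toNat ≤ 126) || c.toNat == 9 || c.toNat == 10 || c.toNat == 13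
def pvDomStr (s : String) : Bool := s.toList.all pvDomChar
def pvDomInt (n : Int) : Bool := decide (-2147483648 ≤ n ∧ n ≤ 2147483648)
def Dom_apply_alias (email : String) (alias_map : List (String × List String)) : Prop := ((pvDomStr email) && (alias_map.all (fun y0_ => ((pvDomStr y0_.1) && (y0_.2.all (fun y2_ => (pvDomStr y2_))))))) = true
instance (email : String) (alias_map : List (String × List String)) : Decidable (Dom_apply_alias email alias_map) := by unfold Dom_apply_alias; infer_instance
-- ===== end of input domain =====

-- B replaces A's early-exit scan with a first-write-wins lookup table built once, then one get; return values proved equal.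

-- ===== PORT A =====
-- A's for-loop over alias_map.items() with its two early returns, then the trailing `return email`.
def applyAliasLoopA (email : String) : List (String × List String) → String
  | [] => email
  | (canonical, aliases) :: rest =>
    if email == PySem.Str.lower canonical then PySem.Str.lower canonical
    else if (aliases.map (fun a => PySem.Str.lower a)).contains email then PySem.Str.lower canonical
    else applyAliasLoopA email rest

def apply_alias (email : String) (alias_map : List (String × List String)) : String :=
  if alias_map.isEmpty then email
  else applyAliasLoopA email alias_map

-- ===== PORT B =====
-- B's table build: for each item, setdefault the lowered canonical, then each lowered alias.
def applyAliasIndex (alias_map : List (String × List String)) : PySem.Dict String String :=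
  alias_map.foldl
    (fun d p =>
      let c := PySem.Str.lower p.1
      let d := d.setdefault c c
      p.2.foldl (fun d a => d.setdefault (PySem.Str.lower a) c) d)
    PySem.Dict.empty

def apply_alias_alt (email : String) (alias_map : List (String × List String)) : String :=
  (applyAliasIndex alias_map).getD email email

-- ===== PRECONDITION & SPEC =====
-- Pre_ excludes association lists with duplicate (case-sensitive) keys: a Python dict cannot
-- contain two equal keys, so such lists do not encode any input of A.
def Pre_apply_alias (email : String) (alias_map : List (String × List String)) : Prop :=
  (alias_map.map Prod.fst).Nodup
instance (email : String) (alias_map : List (String × List String)) : Decidable (Pre_apply_alias email alias_map) := by unfold Pre_apply_alias; infer_instance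

def pvWitness_apply_alias : String × (List (String × List String)) :=
  ("bob@x.com", [("Alice@x.com", ["ally@x.com"]), ("Bob@x.com", ["bobby@x.com"])])

def Spec_apply_alias (email : String) (alias_map : List (String × List String)) (out : String) : Prop := out = apply_alias_alt email alias_map
instance (email : String) (alias_map : List (String × List String)) (out : String) : Decidable (Spec_apply_alias email alias_map out) := by unfold Spec_apply_alias; infer_instance

-- ===== CLAIM (what is proved, stated in full; the proofs are below) =====
def Claim_equal_apply_alias : Prop := ∀ (email : String) (alias_map : List (String × List String)), Dom_apply_alias email alias_map → Pre_apply_alias email alias_map → Spec_apply_alias email alias_map (apply_alias email alias_map)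

-- ===== LEMMAS AND PROOFS =====

-- first matching canonical (lowered), if any, in A's scan order
def scanOpt (email : String) : List (String × List String) → Option String
  | [] => none
  | (canonical, aliases) :: rest =>
    if email == PySem.Str.lower canonical || (aliases.map (fun a => PySem.Str.lower a)).contains email
    then some (PySem.Str.lower canonical)
    else scanOpt email rest

theorem loopA_eq_scanOpt (email : String) (l : List (String × List String)) :
    applyAliasLoopA email l = (scanOpt email l).getD email := by
  induction l with
  | nil => rfl
  | cons p rest ih =>
    obtain ⟨c, as⟩ := p
    simp only [applyAliasLoopA, scanOpt]
    cases h1 : (email == PySem.Str.lower c) <;>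
      cases h2 : ((as.map (fun a => PySem.Str.lower a)).contains email) <;>
        simp [h1, h2, ih]

theorem inner_fold_get? (as : List String) (lc k : String) (d : PySem.Dict String String) :
    ((as.foldl (fun d a => d.setdefault (PySem.Str.lower a) lc) d).get? k)
      = ((d.get? k).orElse (fun _ =>
          if (as.map (fun a => PySem.Str.lower a)).contains k then some lc else none)) := by
  induction as generalizing d with
  | nil => cases hd : d.get? k <;> simp [Option.orElse, hd]
  | cons a as ih =>
    simp only [List.foldl_cons, ih]
    by_cases hk : k = PySem.Str.lower a
    · subst hk
      rw [PySem.Dict.get?_setdefault_self]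
      cases hd : d.get? (PySem.Str.lower a) <;> simp [Option.orElse, hd]
    · rw [PySem.Dict.get?_setdefault_of_ne _ _ hk]
      cases hd : d.get? k <;> simp [Option.orElse, hd, hk]

theorem outer_fold_get? (email : String) (l : List (String × List String))
    (d : PySem.Dict String String) :
    ((l.foldl
        (fun d p =>
          let c := PySem.Str.lower p.1
          let d := d.setdefault c c
          p.2.foldl (fun d a => d.setdefault (PySem.Str.lower a) c) d)
        d).get? email)
      = ((d.get? email).orElse (fun _ => scanOpt email l)) := by
  induction l generalizing d with
  | nil => cases hd : d.get? email <;> simp [scanOpt, Option.orElse, hd]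
  | cons p rest ih =>
    obtain ⟨c, as⟩ := p
    simp only [List.foldl_cons, ih, inner_fold_get?, scanOpt]
    by_cases h1 : email = PySem.Str.lower c
    · subst h1
      rw [PySem.Dict.get?_setdefault_self]
      cases hd : d.get? (PySem.Str.lower c) <;> simp [Option.orElse, hd]
    · rw [PySem.Dict.get?_setdefault_of_ne _ _ h1]
      have h1' : (email == PySem.Str.lower c) = false := by
        simpa using h1
      cases h2 : ((as.map (fun a => PySem.Str.lower a)).contains email) <;>
        cases hd : d.get? email <;>
          simp [Option.orElse, hd, h1, h1', h2]

theorem alt_eq_scanOpt (email : String) (l : List (String × List String)) :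
    apply_alias_alt email l = (scanOpt email l).getD email := by
  unfold apply_alias_alt applyAliasIndex
  rw [PySem.Dict.getD_eq_get?_getD, outer_fold_get?]
  simp [Option.orElse]

-- ===== VERDICT (by name: the statement is the Claim_ definition above) =====
theorem apply_alias_spec : Claim_equal_apply_alias := by
  intro email alias_map _ _
  unfold Spec_apply_alias apply_alias
  rw [alt_eq_scanOpt]
  by_cases h : alias_map.isEmpty
  · rcases List.isEmpty_iff.mp h with rfl
    simp [scanOpt]
  · simp [h, loopA_eq_scanOpt]
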